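-- pv_equiv track=rewrite | github.com/IMA-Development-LLC/Assignment-Remi | util/methods.py | baufort
-- ===== SOURCE A (Python) =====
-- def baufort(meters_per_second: int) -> str:
--     """
--     Oversetter vindhastighet fra meter per sekund til Beaufort skalaen.
--
--     :param meters_per_second: Vindhastighet i meter per sekund
--     :return: Tilsvarende Beaufort beskrivelse som en streng
--     """
--     baufort_limit = {
--         0.3: "Stille",
--         1.6: "Flau vind",
--         3.4: "Svak vind",
--         5.5: "Lett bris",
--         8.0: "Laber bris",
--         10.8: "Frisk bris",
--         13.9: "Liten kuling",
--         17.2: "Stiv kuling",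
--         20.8: "Sterk kuling",
--         24.5: "Liten storm",
--         28.5: "Full storm",
--         32.7: "Sterk storm",
--     }
--
--     # Sjekker vindhastigheten mot baufort grensene og returnerer tilsvarende beskrivelse.
--     for limit, beaufort in baufort_limit.items():
--         if meters_per_second < limit:
--             return beaufort
--     return "Orkan"
-- ===== SOURCE B (Python) =====
-- THRESHOLDS = [0.3, 1.6, 3.4, 5.5, 8.0, 10.8, 13.9, 17.2, 20.8, 24.5, 28.5, 32.7]
-- DESCRIPTIONS = ["Stille", "Flau vind", "Svak vind", "Lett bris", "Laber bris",
--                 "Frisk bris", "Liten kuling", "Stiv kuling", "Sterk kuling",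
--                 "Liten storm", "Full storm", "Sterk storm"]
--
--
-- def baufort(meters_per_second: int) -> str:
--     # Binary search for the first threshold strictly greater than the input
--     # (= bisect_right over the sorted thresholds).
--     lo, hi = 0, len(THRESHOLDS)
--     while lo < hi:
--         mid = (lo + hi) // 2
--         if THRESHOLDS[mid] <= meters_per_second:
--             lo = mid + 1
--         else:
--             hi = mid
--     return DESCRIPTIONS[lo] if lo < len(DESCRIPTIONS) else "Orkan"
-- ===== Notes on version B (the rewrite author's own statement) =====
-- stated objective: idiomatic
-- what changed: Replaced the sequential scan over a float-keyed dict with a binary search (hand-written bisect_right) over two parallel sorted lists of thresholds and descriptions.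
import Mathlib
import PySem

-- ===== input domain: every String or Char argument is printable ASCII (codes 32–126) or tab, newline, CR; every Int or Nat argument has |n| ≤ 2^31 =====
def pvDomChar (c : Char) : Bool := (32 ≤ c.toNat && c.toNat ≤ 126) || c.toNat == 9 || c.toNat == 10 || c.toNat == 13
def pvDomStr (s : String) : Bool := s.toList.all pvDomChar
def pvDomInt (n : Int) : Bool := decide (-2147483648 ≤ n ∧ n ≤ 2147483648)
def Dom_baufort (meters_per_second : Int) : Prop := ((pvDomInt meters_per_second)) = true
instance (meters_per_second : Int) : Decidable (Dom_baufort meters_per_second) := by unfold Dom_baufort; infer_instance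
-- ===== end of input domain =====

-- B replaces A's linear scan over a float-keyed dict with a binary search over
-- two parallel sorted lists (idiomatic bisect_right lookup); same results.
-- Float thresholds: the argument is an int, so each comparison `m < t` / `t ≤ m`
-- against a float threshold t is exactly `m < ⌈t⌉` / `⌈t⌉ ≤ m`; the ports use the
-- integer ceilings [1,2,4,6,8,11,14,18,21,25,29,33], exact on all int inputs.

-- ===== PORT A =====
-- A's dict in insertion order, float limits replaced by their ceilings (exact on ints).
def pvLimitsA : List (Int × String) :=
  [(1, "Stille"), (2, "Flau vind"), (4, "Svak vind"), (6, "Lett bris"),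
   (8, "Laber bris"), (11, "Frisk bris"), (14, "Liten kuling"), (18, "Stiv kuling"),
   (21, "Sterk kuling"), (25, "Liten storm"), (29, "Full storm"), (33, "Sterk storm")]

-- the for-loop: first limit with m < limit wins, else fall through to "Orkan"
def pvScanA (m : Int) : List (Int × String) → String
  | [] => "Orkan"
  | (limit, beaufort) :: rest => if m < limit then beaufort else pvScanA m rest

def baufort (meters_per_second : Int) : String :=
  pvScanA meters_per_second pvLimitsA

-- ===== PORT B =====
def pvThresholds : List Int := [1, 2, 4, 6, 8, 11, 14, 18, 21, 25, 29, 33]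

def pvDescriptions : List String :=
  ["Stille", "Flau vind", "Svak vind", "Lett bris", "Laber bris", "Frisk bris",
   "Liten kuling", "Stiv kuling", "Sterk kuling", "Liten storm", "Full storm",
   "Sterk storm"]

-- Source B's while-loop; fuel = hi - lo at the call site, only to make it total.
def pvBisect (m : Int) : Nat → Nat → Nat → Nat
  | 0, lo, _ => lo
  | fuel + 1, lo, hi =>
    if lo < hi then
      let mid := (lo + hi) / 2
      if pvThresholds.getD mid 0 ≤ m then pvBisect m fuel (mid + 1) hi
      else pvBisect m fuel lo mid
    else lo

def baufort_alt (meters_per_second : Int) : String :=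
  let lo := pvBisect meters_per_second pvThresholds.length 0 pvThresholds.length
  if lo < pvDescriptions.length then pvDescriptions.getD lo "" else "Orkan"

-- ===== PRECONDITION & SPEC =====
def Spec_baufort (meters_per_second : Int) (out : String) : Prop := out = baufort_alt meters_per_second
instance (meters_per_second : Int) (out : String) : Decidable (Spec_baufort meters_per_second out) := by unfold Spec_baufort; infer_instance

-- ===== CLAIM (what is proved, stated in full; the proofs are below) =====
def Claim_equal_baufort : Prop := ∀ (meters_per_second : Int), Dom_baufort meters_per_second → Spec_baufort meters_per_second (baufort meters_per_second)

-- ===== LEMMAS AND PROOFS =====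

-- ===== VERDICT (by name: the statement is the Claim_ definition above) =====
theorem baufort_spec : Claim_equal_baufort := by
  intro m _
  unfold Spec_baufort
  by_cases h0 : m < 1
  · have a0 : ¬ ((1:Int) ≤ m) := by omega
    have b0 : m < (1:Int) := by omega
    have a1 : ¬ ((2:Int) ≤ m) := by omega
    have b1 : m < (2:Int) := by omega
    have a2 : ¬ ((4:Int) ≤ m) := by omega
    have b2 : m < (4:Int) := by omega
    have a3 : ¬ ((6:Int) ≤ m) := by omega
    have b3 : m < (6:Int) := by omega
    have a4 : ¬ ((8:Int) ≤ m) := by omega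
    have b4 : m < (8:Int) := by omega
    have a5 : ¬ ((11:Int) ≤ m) := by omega
    have b5 : m < (11:Int) := by omega
    have a6 : ¬ ((14:Int) ≤ m) := by omega
    have b6 : m < (14:Int) := by omega
    have a7 : ¬ ((18:Int) ≤ m) := by omega
    have b7 : m < (18:Int) := by omega
    have a8 : ¬ ((21:Int) ≤ m) := by omega
    have b8 : m < (21:Int) := by omega
    have a9 : ¬ ((25:Int) ≤ m) := by omega
    have b9 : m < (25:Int) := by omega
    have a10 : ¬ ((29:Int) ≤ m) := by omega
    have b10 : m < (29:Int) := by omega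
    have a11 : ¬ ((33:Int) ≤ m) := by omega
    have b11 : m < (33:Int) := by omega
    simp [baufort, baufort_alt, pvScanA, pvLimitsA, pvBisect, pvThresholds, pvDescriptions, a0, b0, a1, a3, a6]
  by_cases h1 : m < 2
  · have a0 : (1:Int) ≤ m := by omega
    have b0 : ¬ (m < (1:Int)) := by omega
    have a1 : ¬ ((2:Int) ≤ m) := by omega
    have b1 : m < (2:Int) := by omega
    have a2 : ¬ ((4:Int) ≤ m) := by omega
    have b2 : m < (4:Int) := by omega
    have a3 : ¬ ((6:Int) ≤ m) := by omega
    have b3 : m < (6:Int) := by omega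
    have a4 : ¬ ((8:Int) ≤ m) := by omega
    have b4 : m < (8:Int) := by omega
    have a5 : ¬ ((11:Int) ≤ m) := by omega
    have b5 : m < (11:Int) := by omega
    have a6 : ¬ ((14:Int) ≤ m) := by omega
    have b6 : m < (14:Int) := by omega
    have a7 : ¬ ((18:Int) ≤ m) := by omega
    have b7 : m < (18:Int) := by omega
    have a8 : ¬ ((21:Int) ≤ m) := by omega
    have b8 : m < (21:Int) := by omega
    have a9 : ¬ ((25:Int) ≤ m) := by omega
    have b9 : m < (25:Int) := by omega
    have a10 : ¬ ((29:Int) ≤ m) := by omega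
    have b10 : m < (29:Int) := by omega
    have a11 : ¬ ((33:Int) ≤ m) := by omega
    have b11 : m < (33:Int) := by omega
    simp [baufort, baufort_alt, pvScanA, pvLimitsA, pvBisect, pvThresholds, pvDescriptions, a0, b0, a1, b1, a3, a6]
  by_cases h2 : m < 4
  · have a0 : (1:Int) ≤ m := by omega
    have b0 : ¬ (m < (1:Int)) := by omega
    have a1 : (2:Int) ≤ m := by omega
    have b1 : ¬ (m < (2:Int)) := by omega
    have a2 : ¬ ((4:Int) ≤ m) := by omega
    have b2 : m < (4:Int) := by omega
    have a3 : ¬ ((6:Int) ≤ m) := by omega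
    have b3 : m < (6:Int) := by omega
    have a4 : ¬ ((8:Int) ≤ m) := by omega
    have b4 : m < (8:Int) := by omega
    have a5 : ¬ ((11:Int) ≤ m) := by omega
    have b5 : m < (11:Int) := by omega
    have a6 : ¬ ((14:Int) ≤ m) := by omega
    have b6 : m < (14:Int) := by omega
    have a7 : ¬ ((18:Int) ≤ m) := by omega
    have b7 : m < (18:Int) := by omega
    have a8 : ¬ ((21:Int) ≤ m) := by omega
    have b8 : m < (21:Int) := by omega
    have a9 : ¬ ((25:Int) ≤ m) := by omega
    have b9 : m < (25:Int) := by omega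
    have a10 : ¬ ((29:Int) ≤ m) := by omega
    have b10 : m < (29:Int) := by omega
    have a11 : ¬ ((33:Int) ≤ m) := by omega
    have b11 : m < (33:Int) := by omega
    simp [baufort, baufort_alt, pvScanA, pvLimitsA, pvBisect, pvThresholds, pvDescriptions, b0, a1, b1, a2, b2, a3, a6]
  by_cases h3 : m < 6
  · have a0 : (1:Int) ≤ m := by omega
    have b0 : ¬ (m < (1:Int)) := by omega
    have a1 : (2:Int) ≤ m := by omega
    have b1 : ¬ (m < (2:Int)) := by omega
    have a2 : (4:Int) ≤ m := by omega
    have b2 : ¬ (m < (4:Int)) := by omega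
    have a3 : ¬ ((6:Int) ≤ m) := by omega
    have b3 : m < (6:Int) := by omega
    have a4 : ¬ ((8:Int) ≤ m) := by omega
    have b4 : m < (8:Int) := by omega
    have a5 : ¬ ((11:Int) ≤ m) := by omega
    have b5 : m < (11:Int) := by omega
    have a6 : ¬ ((14:Int) ≤ m) := by omega
    have b6 : m < (14:Int) := by omega
    have a7 : ¬ ((18:Int) ≤ m) := by omega
    have b7 : m < (18:Int) := by omega
    have a8 : ¬ ((21:Int) ≤ m) := by omega
    have b8 : m < (21:Int) := by omega
    have a9 : ¬ ((25:Int) ≤ m) := by omega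
    have b9 : m < (25:Int) := by omega
    have a10 : ¬ ((29:Int) ≤ m) := by omega
    have b10 : m < (29:Int) := by omega
    have a11 : ¬ ((33:Int) ≤ m) := by omega
    have b11 : m < (33:Int) := by omega
    simp [baufort, baufort_alt, pvScanA, pvLimitsA, pvBisect, pvThresholds, pvDescriptions, b0, a1, b1, a2, b2, a3, b3, a6]
  by_cases h4 : m < 8
  · have a0 : (1:Int) ≤ m := by omega
    have b0 : ¬ (m < (1:Int)) := by omega
    have a1 : (2:Int) ≤ m := by omega
    have b1 : ¬ (m < (2:Int)) := by omega
    have a2 : (4:Int) ≤ m := by omega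
    have b2 : ¬ (m < (4:Int)) := by omega
    have a3 : (6:Int) ≤ m := by omega
    have b3 : ¬ (m < (6:Int)) := by omega
    have a4 : ¬ ((8:Int) ≤ m) := by omega
    have b4 : m < (8:Int) := by omega
    have a5 : ¬ ((11:Int) ≤ m) := by omega
    have b5 : m < (11:Int) := by omega
    have a6 : ¬ ((14:Int) ≤ m) := by omega
    have b6 : m < (14:Int) := by omega
    have a7 : ¬ ((18:Int) ≤ m) := by omega
    have b7 : m < (18:Int) := by omega
    have a8 : ¬ ((21:Int) ≤ m) := by omega
    have b8 : m < (21:Int) := by omega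
    have a9 : ¬ ((25:Int) ≤ m) := by omega
    have b9 : m < (25:Int) := by omega
    have a10 : ¬ ((29:Int) ≤ m) := by omega
    have b10 : m < (29:Int) := by omega
    have a11 : ¬ ((33:Int) ≤ m) := by omega
    have b11 : m < (33:Int) := by omega
    simp [baufort, baufort_alt, pvScanA, pvLimitsA, pvBisect, pvThresholds, pvDescriptions, b0, b1, b2, a3, b3, a4, b4, a5, a6]
  by_cases h5 : m < 11
  · have a0 : (1:Int) ≤ m := by omega
    have b0 : ¬ (m < (1:Int)) := by omega
    have a1 : (2:Int) ≤ m := by omega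
    have b1 : ¬ (m < (2:Int)) := by omega
    have a2 : (4:Int) ≤ m := by omega
    have b2 : ¬ (m < (4:Int)) := by omega
    have a3 : (6:Int) ≤ m := by omega
    have b3 : ¬ (m < (6:Int)) := by omega
    have a4 : (8:Int) ≤ m := by omega
    have b4 : ¬ (m < (8:Int)) := by omega
    have a5 : ¬ ((11:Int) ≤ m) := by omega
    have b5 : m < (11:Int) := by omega
    have a6 : ¬ ((14:Int) ≤ m) := by omega
    have b6 : m < (14:Int) := by omega
    have a7 : ¬ ((18:Int) ≤ m) := by omega
    have b7 : m < (18:Int) := by omega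
    have a8 : ¬ ((21:Int) ≤ m) := by omega
    have b8 : m < (21:Int) := by omega
    have a9 : ¬ ((25:Int) ≤ m) := by omega
    have b9 : m < (25:Int) := by omega
    have a10 : ¬ ((29:Int) ≤ m) := by omega
    have b10 : m < (29:Int) := by omega
    have a11 : ¬ ((33:Int) ≤ m) := by omega
    have b11 : m < (33:Int) := by omega
    simp [baufort, baufort_alt, pvScanA, pvLimitsA, pvBisect, pvThresholds, pvDescriptions, b0, b1, b2, a3, b3, a4, b4, a5, b5, a6]
  by_cases h6 : m < 14
  · have a0 : (1:Int) ≤ m := by omega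
    have b0 : ¬ (m < (1:Int)) := by omega
    have a1 : (2:Int) ≤ m := by omega
    have b1 : ¬ (m < (2:Int)) := by omega
    have a2 : (4:Int) ≤ m := by omega
    have b2 : ¬ (m < (4:Int)) := by omega
    have a3 : (6:Int) ≤ m := by omega
    have b3 : ¬ (m < (6:Int)) := by omega
    have a4 : (8:Int) ≤ m := by omega
    have b4 : ¬ (m < (8:Int)) := by omega
    have a5 : (11:Int) ≤ m := by omega
    have b5 : ¬ (m < (11:Int)) := by omega
    have a6 : ¬ ((14:Int) ≤ m) := by omega
    have b6 : m < (14:Int) := by omega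
    have a7 : ¬ ((18:Int) ≤ m) := by omega
    have b7 : m < (18:Int) := by omega
    have a8 : ¬ ((21:Int) ≤ m) := by omega
    have b8 : m < (21:Int) := by omega
    have a9 : ¬ ((25:Int) ≤ m) := by omega
    have b9 : m < (25:Int) := by omega
    have a10 : ¬ ((29:Int) ≤ m) := by omega
    have b10 : m < (29:Int) := by omega
    have a11 : ¬ ((33:Int) ≤ m) := by omega
    have b11 : m < (33:Int) := by omega
    simp [baufort, baufort_alt, pvScanA, pvLimitsA, pvBisect, pvThresholds, pvDescriptions, b0, b1, b2, a3, b3, b4, a5, b5, a6, b6]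
  by_cases h7 : m < 18
  · have a0 : (1:Int) ≤ m := by omega
    have b0 : ¬ (m < (1:Int)) := by omega
    have a1 : (2:Int) ≤ m := by omega
    have b1 : ¬ (m < (2:Int)) := by omega
    have a2 : (4:Int) ≤ m := by omega
    have b2 : ¬ (m < (4:Int)) := by omega
    have a3 : (6:Int) ≤ m := by omega
    have b3 : ¬ (m < (6:Int)) := by omega
    have a4 : (8:Int) ≤ m := by omega
    have b4 : ¬ (m < (8:Int)) := by omega
    have a5 : (11:Int) ≤ m := by omega
    have b5 : ¬ (m < (11:Int)) := by omega
    have a6 : (14:Int) ≤ m := by omega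
    have b6 : ¬ (m < (14:Int)) := by omega
    have a7 : ¬ ((18:Int) ≤ m) := by omega
    have b7 : m < (18:Int) := by omega
    have a8 : ¬ ((21:Int) ≤ m) := by omega
    have b8 : m < (21:Int) := by omega
    have a9 : ¬ ((25:Int) ≤ m) := by omega
    have b9 : m < (25:Int) := by omega
    have a10 : ¬ ((29:Int) ≤ m) := by omega
    have b10 : m < (29:Int) := by omega
    have a11 : ¬ ((33:Int) ≤ m) := by omega
    have b11 : m < (33:Int) := by omega
    simp [baufort, baufort_alt, pvScanA, pvLimitsA, pvBisect, pvThresholds, pvDescriptions, b0, b1, b2, b3, b4, b5, a6, b6, a7, b7, a8, a9]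
  by_cases h8 : m < 21
  · have a0 : (1:Int) ≤ m := by omega
    have b0 : ¬ (m < (1:Int)) := by omega
    have a1 : (2:Int) ≤ m := by omega
    have b1 : ¬ (m < (2:Int)) := by omega
    have a2 : (4:Int) ≤ m := by omega
    have b2 : ¬ (m < (4:Int)) := by omega
    have a3 : (6:Int) ≤ m := by omega
    have b3 : ¬ (m < (6:Int)) := by omega
    have a4 : (8:Int) ≤ m := by omega
    have b4 : ¬ (m < (8:Int)) := by omega
    have a5 : (11:Int) ≤ m := by omega
    have b5 : ¬ (m < (11:Int)) := by omega
    have a6 : (14:Int) ≤ m := by omega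
    have b6 : ¬ (m < (14:Int)) := by omega
    have a7 : (18:Int) ≤ m := by omega
    have b7 : ¬ (m < (18:Int)) := by omega
    have a8 : ¬ ((21:Int) ≤ m) := by omega
    have b8 : m < (21:Int) := by omega
    have a9 : ¬ ((25:Int) ≤ m) := by omega
    have b9 : m < (25:Int) := by omega
    have a10 : ¬ ((29:Int) ≤ m) := by omega
    have b10 : m < (29:Int) := by omega
    have a11 : ¬ ((33:Int) ≤ m) := by omega
    have b11 : m < (33:Int) := by omega
    simp [baufort, baufort_alt, pvScanA, pvLimitsA, pvBisect, pvThresholds, pvDescriptions, b0, b1, b2, b3, b4, b5, a6, b6, a7, b7, a8, b8, a9]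
  by_cases h9 : m < 25
  · have a0 : (1:Int) ≤ m := by omega
    have b0 : ¬ (m < (1:Int)) := by omega
    have a1 : (2:Int) ≤ m := by omega
    have b1 : ¬ (m < (2:Int)) := by omega
    have a2 : (4:Int) ≤ m := by omega
    have b2 : ¬ (m < (4:Int)) := by omega
    have a3 : (6:Int) ≤ m := by omega
    have b3 : ¬ (m < (6:Int)) := by omega
    have a4 : (8:Int) ≤ m := by omega
    have b4 : ¬ (m < (8:Int)) := by omega
    have a5 : (11:Int) ≤ m := by omega
    have b5 : ¬ (m < (11:Int)) := by omega
    have a6 : (14:Int) ≤ m := by omega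
    have b6 : ¬ (m < (14:Int)) := by omega
    have a7 : (18:Int) ≤ m := by omega
    have b7 : ¬ (m < (18:Int)) := by omega
    have a8 : (21:Int) ≤ m := by omega
    have b8 : ¬ (m < (21:Int)) := by omega
    have a9 : ¬ ((25:Int) ≤ m) := by omega
    have b9 : m < (25:Int) := by omega
    have a10 : ¬ ((29:Int) ≤ m) := by omega
    have b10 : m < (29:Int) := by omega
    have a11 : ¬ ((33:Int) ≤ m) := by omega
    have b11 : m < (33:Int) := by omega
    simp [baufort, baufort_alt, pvScanA, pvLimitsA, pvBisect, pvThresholds, pvDescriptions, b0, b1, b2, b3, b4, b5, a6, b6, b7, a8, b8, a9, b9]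
  by_cases h10 : m < 29
  · have a0 : (1:Int) ≤ m := by omega
    have b0 : ¬ (m < (1:Int)) := by omega
    have a1 : (2:Int) ≤ m := by omega
    have b1 : ¬ (m < (2:Int)) := by omega
    have a2 : (4:Int) ≤ m := by omega
    have b2 : ¬ (m < (4:Int)) := by omega
    have a3 : (6:Int) ≤ m := by omega
    have b3 : ¬ (m < (6:Int)) := by omega
    have a4 : (8:Int) ≤ m := by omega
    have b4 : ¬ (m < (8:Int)) := by omega
    have a5 : (11:Int) ≤ m := by omega
    have b5 : ¬ (m < (11:Int)) := by omega
    have a6 : (14:Int) ≤ m := by omega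
    have b6 : ¬ (m < (14:Int)) := by omega
    have a7 : (18:Int) ≤ m := by omega
    have b7 : ¬ (m < (18:Int)) := by omega
    have a8 : (21:Int) ≤ m := by omega
    have b8 : ¬ (m < (21:Int)) := by omega
    have a9 : (25:Int) ≤ m := by omega
    have b9 : ¬ (m < (25:Int)) := by omega
    have a10 : ¬ ((29:Int) ≤ m) := by omega
    have b10 : m < (29:Int) := by omega
    have a11 : ¬ ((33:Int) ≤ m) := by omega
    have b11 : m < (33:Int) := by omega
    simp [baufort, baufort_alt, pvScanA, pvLimitsA, pvBisect, pvThresholds, pvDescriptions, b0, b1, b2, b3, b4, b5, a6, b6, b7, b8, a9, b9, a10, b10, a11]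
  by_cases h11 : m < 33
  · have a0 : (1:Int) ≤ m := by omega
    have b0 : ¬ (m < (1:Int)) := by omega
    have a1 : (2:Int) ≤ m := by omega
    have b1 : ¬ (m < (2:Int)) := by omega
    have a2 : (4:Int) ≤ m := by omega
    have b2 : ¬ (m < (4:Int)) := by omega
    have a3 : (6:Int) ≤ m := by omega
    have b3 : ¬ (m < (6:Int)) := by omega
    have a4 : (8:Int) ≤ m := by omega
    have b4 : ¬ (m < (8:Int)) := by omega
    have a5 : (11:Int) ≤ m := by omega
    have b5 : ¬ (m < (11:Int)) := by omega
    have a6 : (14:Int) ≤ m := by omega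
    have b6 : ¬ (m < (14:Int)) := by omega
    have a7 : (18:Int) ≤ m := by omega
    have b7 : ¬ (m < (18:Int)) := by omega
    have a8 : (21:Int) ≤ m := by omega
    have b8 : ¬ (m < (21:Int)) := by omega
    have a9 : (25:Int) ≤ m := by omega
    have b9 : ¬ (m < (25:Int)) := by omega
    have a10 : (29:Int) ≤ m := by omega
    have b10 : ¬ (m < (29:Int)) := by omega
    have a11 : ¬ ((33:Int) ≤ m) := by omega
    have b11 : m < (33:Int) := by omega
    simp [baufort, baufort_alt, pvScanA, pvLimitsA, pvBisect, pvThresholds, pvDescriptions, b0, b1, b2, b3, b4, b5, a6, b6, b7, b8, a9, b9, a10, b10, a11, b11]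
  have a0 : (1:Int) ≤ m := by omega
  have b0 : ¬ (m < (1:Int)) := by omega
  have a1 : (2:Int) ≤ m := by omega
  have b1 : ¬ (m < (2:Int)) := by omega
  have a2 : (4:Int) ≤ m := by omega
  have b2 : ¬ (m < (4:Int)) := by omega
  have a3 : (6:Int) ≤ m := by omega
  have b3 : ¬ (m < (6:Int)) := by omega
  have a4 : (8:Int) ≤ m := by omega
  have b4 : ¬ (m < (8:Int)) := by omega
  have a5 : (11:Int) ≤ m := by omega
  have b5 : ¬ (m < (11:Int)) := by omega
  have a6 : (14:Int) ≤ m := by omega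
  have b6 : ¬ (m < (14:Int)) := by omega
  have a7 : (18:Int) ≤ m := by omega
  have b7 : ¬ (m < (18:Int)) := by omega
  have a8 : (21:Int) ≤ m := by omega
  have b8 : ¬ (m < (21:Int)) := by omega
  have a9 : (25:Int) ≤ m := by omega
  have b9 : ¬ (m < (25:Int)) := by omega
  have a10 : (29:Int) ≤ m := by omega
  have b10 : ¬ (m < (29:Int)) := by omega
  have a11 : (33:Int) ≤ m := by omega
  have b11 : ¬ (m < (33:Int)) := by omega
  simp [baufort, baufort_alt, pvScanA, pvLimitsA, pvBisect, pvThresholds, pvDescriptions, b0, b1, b2, b3, b4, b5, a6, b6, b7, b8, a9, b9, b10, a11, b11]
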